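-- pv_equiv track=rewrite | github.com/miliar/Code_Jam_Webscraper | Solutions_python/Problem_117/704.py | yofminbad
-- ===== SOURCE A (Python) =====
-- def yofminbad(good,a):
--     min = 1000
--     y = 0
--     for j in range(len(a)):
--         r = a[j]
--         for i in range(len(r)):
--             if r[i]<min and good[j][i]==0:
--                 y = j
--                 min = r[i]
--     return y
-- ===== SOURCE B (Python) =====
-- def yofminbad(good, a):
--     # Two staged passes: first compute the global minimum unmasked value below 1000,
--     # then locate the first row that contains it.
--     vals = [a[j][i] for j in range(len(a)) for i in range(len(a[j]))
--             if a[j][i] < 1000 and good[j][i] == 0]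
--     if not vals:
--         return 0
--     m = min(vals)
--     for j in range(len(a)):
--         if any(a[j][i] == m and good[j][i] == 0 for i in range(len(a[j]))):
--             return j
--     return 0  # unreachable: m occurs in vals
-- ===== Notes on version B (the rewrite author's own statement) =====
-- stated objective: alternative
-- what changed: Replaces A's single running-(min,row) accumulator loop by two staged passes: first compute only the global minimum unmasked value below 1000, then a separate search pass locates the first row containing that value.
-- outside the precondition, e.g. on yofminbad([[]], [[1000]]): A returns 0, B returns 0
import Mathlib
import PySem

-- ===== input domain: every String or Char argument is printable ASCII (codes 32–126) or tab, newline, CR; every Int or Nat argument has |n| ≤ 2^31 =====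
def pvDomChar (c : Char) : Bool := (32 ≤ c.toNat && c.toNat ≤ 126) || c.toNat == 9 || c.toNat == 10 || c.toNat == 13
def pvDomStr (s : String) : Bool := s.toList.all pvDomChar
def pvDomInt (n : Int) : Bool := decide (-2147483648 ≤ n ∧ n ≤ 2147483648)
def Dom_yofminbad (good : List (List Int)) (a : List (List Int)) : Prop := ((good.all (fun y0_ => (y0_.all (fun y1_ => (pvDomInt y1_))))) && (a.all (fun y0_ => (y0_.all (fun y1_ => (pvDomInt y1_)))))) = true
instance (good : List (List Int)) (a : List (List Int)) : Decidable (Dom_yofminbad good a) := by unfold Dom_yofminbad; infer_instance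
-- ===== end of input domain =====

-- B replaces A's single running-(min,row) loop by two staged passes (compute the global
-- minimum unmasked value < 1000, then locate the first row containing it); return value only.

-- ===== PORT A =====
-- literal port of A's nested loop: state (min, y) initialised (1000, 0); indices are in range under Pre_.
def yofminbad (good : List (List Int)) (a : List (List Int)) : Int :=
  ((List.range a.length).foldl (fun (s : Int × Int) j =>
      let r := a.getD j []
      (List.range r.length).foldl (fun (s : Int × Int) i =>
        if r.getD i 0 < s.1 ∧ (good.getD j []).getD i 0 = 0 then (r.getD i 0, j) else s) s)
    ((1000 : Int), (0 : Int))).2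

-- ===== PORT B =====
-- literal port of B: first pass collects the unmasked values below 1000 and takes their minimum;
-- second pass returns the first row index containing that minimum (the trailing 0 is Python's
-- unreachable fallthrough).
def yofminbad_alt (good : List (List Int)) (a : List (List Int)) : Int :=
  let vals : List Int :=
    (List.range a.length).flatMap (fun j =>
      (List.range (a.getD j []).length).filterMap (fun i =>
        if (a.getD j []).getD i 0 < 1000 ∧ (good.getD j []).getD i 0 = 0
        then some ((a.getD j []).getD i 0) else none))
  match PySem.List.min? vals (fun v => v) with
  | none => 0
  | some m =>
    match (List.range a.length).find? (fun j =>
        (List.range (a.getD j []).length).any (fun i =>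
          (a.getD j []).getD i 0 == m && (good.getD j []).getD i 0 == 0)) with
    | some j => (j : Int)
    | none => 0

-- ===== PRECONDITION & SPEC =====
-- Pre_ excludes ragged inputs where good does not cover a's shape: there A raises IndexError on
-- good[j][i] whenever a value below the running minimum sits at an index good's row lacks (on a few
-- such inputs A still returns because the test short-circuits; those are excluded with the rest).
def Pre_yofminbad (good : List (List Int)) (a : List (List Int)) : Prop :=
  a.length ≤ good.length ∧ ∀ j < a.length, (a.getD j []).length ≤ (good.getD j []).length
instance (good : List (List Int)) (a : List (List Int)) : Decidable (Pre_yofminbad good a) := by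
  unfold Pre_yofminbad; infer_instance
def pvWitness_yofminbad : List (List Int) × List (List Int) :=
  ([[0, 1], [0]], [[5, 3], [2]])
def Spec_yofminbad (good : List (List Int)) (a : List (List Int)) (out : Int) : Prop := out = yofminbad_alt good a
instance (good : List (List Int)) (a : List (List Int)) (out : Int) : Decidable (Spec_yofminbad good a out) := by unfold Spec_yofminbad; infer_instance

-- ===== CLAIM (what is proved, stated in full; the proofs are below) =====
def Claim_equal_yofminbad : Prop := ∀ (good : List (List Int)) (a : List (List Int)), Dom_yofminbad good a → Pre_yofminbad good a → Spec_yofminbad good a (yofminbad good a)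

-- ===== LEMMAS AND PROOFS =====

-- A's update step on the state (current min, its row).
def pvStep (s p : Int × Int) : Int × Int := if p.1 < s.1 then p else s

-- the good-masked candidate list, not yet filtered by < 1000
def pvL (good : List (List Int)) (a : List (List Int)) : List (Int × Int) :=
  (List.range a.length).flatMap (fun j =>
    (List.range (a.getD j []).length).filterMap (fun i =>
      if (good.getD j []).getD i 0 = 0 then some ((a.getD j []).getD i 0, j) else none))

-- one row's (value, row) candidates with both conditions
def pvF (good : List (List Int)) (a : List (List Int)) (j : Nat) : List (Int × Int) :=
  (List.range (a.getD j []).length).filterMap (fun i =>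
    if (a.getD j []).getD i 0 < 1000 ∧ (good.getD j []).getD i 0 = 0
    then some ((a.getD j []).getD i 0, (j : Int)) else none)

def pvCs (good : List (List Int)) (a : List (List Int)) : List (Int × Int) :=
  (List.range a.length).flatMap (pvF good a)

theorem pv_foldl_ext {α σ : Type} (f g : σ → α → σ) (h : ∀ s x, f s x = g s x)
    (l : List α) (s : σ) : l.foldl f s = l.foldl g s := by
  have : f = g := funext fun s => funext fun x => h s x
  rw [this]

theorem pv_foldl_filterMap {α β σ : Type} (l : List α) (f : α → Option β) (g : σ → β → σ) (s : σ) :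
    (l.filterMap f).foldl g s = l.foldl (fun s x => match f x with | some b => g s b | none => s) s := by
  induction l generalizing s with
  | nil => rfl
  | cons x t ih =>
      cases h : f x <;> simp [h, ih]

theorem pv_foldl_flatMap {α β σ : Type} (l : List α) (f : α → List β) (g : σ → β → σ) (s : σ) :
    (l.flatMap f).foldl g s = l.foldl (fun s x => (f x).foldl g s) s := by
  induction l generalizing s with
  | nil => rfl
  | cons x t ih => simp [List.flatMap_cons, List.foldl_append, ih]

theorem pv_filter_filterMap {α β : Type} (l : List α) (f : α → Option β) (p : β → Bool) :
    (l.filterMap f).filter p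
      = l.filterMap (fun x => (f x).bind (fun y => if p y then some y else none)) := by
  induction l with
  | nil => rfl
  | cons x t ih =>
      cases h : f x with
      | none => simp [h, ih]
      | some y =>
          by_cases hp : p y <;> simp [h, hp, ih]

theorem pv_filter_flatMap {α β : Type} (l : List α) (f : α → List β) (p : β → Bool) :
    (l.flatMap f).filter p = l.flatMap (fun x => (f x).filter p) := by
  induction l with
  | nil => rfl
  | cons x t ih => simp [List.flatMap_cons, List.filter_append, ih]

-- A's value is the fold of pvStep over the masked candidates.
theorem pvA_eq_fold (good a : List (List Int)) :
    yofminbad good a = ((pvL good a).foldl pvStep ((1000 : Int), (0 : Int))).2 := by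
  unfold yofminbad pvL
  rw [pv_foldl_flatMap]
  refine congrArg Prod.snd (pv_foldl_ext _ _ (fun s j => ?_) _ _)
  simp only []
  rw [pv_foldl_filterMap]
  refine pv_foldl_ext _ _ (fun s i => ?_) _ _
  by_cases hg : (good.getD j []).getD i 0 = 0 <;>
    by_cases hv : (a.getD j []).getD i 0 < s.1 <;>
      (simp only [List.getD] at hg hv ⊢; simp [hg, hv, pvStep])

-- the (<1000)-filtered masked candidate list is pvCs
theorem pvCs_eq_filter (good a : List (List Int)) :
    pvCs good a = (pvL good a).filter (fun p => decide (p.1 < 1000)) := by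
  unfold pvCs pvF pvL
  rw [pv_filter_flatMap]
  refine List.flatMap_congr (fun j _ => ?_)
  rw [pv_filter_filterMap]
  refine List.filterMap_congr (fun i _ => ?_)
  by_cases hg : (good.getD j []).getD i 0 = 0 <;>
    by_cases hv : (a.getD j []).getD i 0 < 1000 <;>
      (simp only [List.getD] at hg hv ⊢; simp [hg])

-- B's value list is the first projection of pvCs
theorem pvVals_eq_map (good a : List (List Int)) :
    ((List.range a.length).flatMap (fun j =>
      (List.range (a.getD j []).length).filterMap (fun i =>
        if (a.getD j []).getD i 0 < 1000 ∧ (good.getD j []).getD i 0 = 0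
        then some ((a.getD j []).getD i 0) else none)))
      = (pvCs good a).map Prod.fst := by
  unfold pvCs pvF
  rw [List.map_flatMap]
  refine List.flatMap_congr (fun j _ => ?_)
  rw [List.map_filterMap]
  refine List.filterMap_congr (fun i _ => ?_)
  by_cases hv : ((a.getD j []).getD i 0 < 1000 ∧ (good.getD j []).getD i 0 = 0) <;> rw [apply_ite (Option.map Prod.fst)] <;> rfl

-- elements with value ≥ 1000 never affect the fold once the minimum is ≤ 1000
theorem pv_fold_filter (l : List (Int × Int)) (s : Int × Int) (hs : s.1 ≤ 1000) :
    l.foldl pvStep s = (l.filter (fun p => decide (p.1 < 1000))).foldl pvStep s := by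
  induction l generalizing s with
  | nil => rfl
  | cons p t ih =>
      by_cases hp : p.1 < 1000
      · have hs' : (pvStep s p).1 ≤ 1000 := by
          unfold pvStep; split_ifs with h
          · exact le_of_lt hp
          · exact hs
        simp [hp, ih _ hs']
      · have hns : ¬ p.1 < s.1 := fun h => hp (lt_of_lt_of_le h hs)
        simp [hp, pvStep, hns, ih _ hs]

theorem pv_fold_mem (t : List (Int × Int)) (c : Int × Int) :
    t.foldl pvStep c ∈ c :: t := by
  induction t generalizing c with
  | nil => simp
  | cons p t ih =>
      simp only [List.foldl_cons]
      rcases List.mem_cons.mp (ih (pvStep c p)) with h | h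
      · rw [h]; unfold pvStep; split_ifs <;> simp
      · simp [h]

theorem pv_fold_fst_le (t : List (Int × Int)) (c : Int × Int) :
    (t.foldl pvStep c).1 ≤ c.1 := by
  induction t generalizing c with
  | nil => simp
  | cons p t ih =>
      simp only [List.foldl_cons]
      refine le_trans (ih (pvStep c p)) ?_
      unfold pvStep; split_ifs with h
      · exact le_of_lt h
      · exact le_refl _

-- the fold's first component is the running min of the values
theorem pv_fold_fst (t : List (Int × Int)) (c : Int × Int) :
    (t.foldl pvStep c).1 = (t.map Prod.fst).foldl min c.1 := by
  induction t generalizing c with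
  | nil => rfl
  | cons p t ih =>
      simp only [List.foldl_cons, List.map_cons]
      rw [ih]
      congr 1
      unfold pvStep; split_ifs with h <;> omega

-- the fold result is the FIRST element whose value equals the minimum
theorem pv_find_fold (t : List (Int × Int)) (c : Int × Int) :
    (c :: t).find? (fun p => p.1 == (t.foldl pvStep c).1) = some (t.foldl pvStep c) := by
  induction t generalizing c with
  | nil => simp
  | cons p t ih =>
      simp only [List.foldl_cons]
      by_cases h : p.1 < c.1
      · have hstep : pvStep c p = p := by unfold pvStep; simp [h]
        rw [hstep]
        have hle : (t.foldl pvStep p).1 ≤ p.1 := pv_fold_fst_le t p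
        have hne : ¬ c.1 = (t.foldl pvStep p).1 := by omega
        rw [List.find?_cons_of_neg (by simp [hne])]
        exact ih p
      · have hstep : pvStep c p = c := by unfold pvStep; simp; omega
        rw [hstep]
        have ihc := ih c
        by_cases hc : c.1 = (t.foldl pvStep c).1
        · have : (c :: t).find? (fun q => q.1 == (t.foldl pvStep c).1) = some c := by
            rw [List.find?_cons_of_pos (by simp [hc])]
          have hce : c = t.foldl pvStep c := by
            have := ihc; rw [this] at this
            rw [List.find?_cons_of_pos (by simp [hc])] at ihc
            exact Option.some.inj ihc
          rw [List.find?_cons_of_pos (by simp [hc]), ← hce]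
        · have hle : (t.foldl pvStep c).1 ≤ c.1 := pv_fold_fst_le t c
          have hpne : ¬ p.1 = (t.foldl pvStep c).1 := by omega
          rw [List.find?_cons_of_neg (by simp [hc]),
              List.find?_cons_of_neg (by simp [hpne])]
          rw [List.find?_cons_of_neg (by simp [hc])] at ihc
          exact ihc

-- find? over a flatMap searches block by block
theorem pv_find_flatMap {α β : Type} (l : List α) (f : α → List β) (p : β → Bool) :
    (l.flatMap f).find? p = l.findSome? (fun x => (f x).find? p) := by
  induction l with
  | nil => rfl
  | cons x t ih =>
      simp only [List.flatMap_cons, List.findSome?_cons]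
      cases h : (f x).find? p with
      | some b => simp [List.find?_append, h]
      | none => simp [List.find?_append, h, ih]

-- findSome? via a boolean guard that matches isSome
theorem pv_findSome_find {α β : Type} (l : List α) (g : α → Option β) (Q : α → Bool)
    (h : ∀ x ∈ l, Q x = (g x).isSome) :
    l.findSome? g = (l.find? Q).bind g := by
  induction l with
  | nil => rfl
  | cons x t ih =>
      have hx := h x (List.mem_cons_self)
      cases hg : g x with
      | some b =>
          have : Q x = true := by rw [hx, hg]; rfl
          simp [List.find?_cons_of_pos this, hg]
      | none =>
          have : Q x = false := by rw [hx, hg]; rfl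
          simp [this, hg,
                ih (fun y hy => h y (List.mem_cons_of_mem _ hy))]

-- every candidate of row j carries row index j
theorem pvF_snd (good a : List (List Int)) (j : Nat) (p : Int × Int) (hp : p ∈ pvF good a j) :
    p.2 = (j : Int) := by
  unfold pvF at hp
  rcases List.mem_filterMap.mp hp with ⟨i, _, hi⟩
  split at hi
  · cases hi; rfl
  · cases hi

-- every candidate value is below 1000
theorem pvCs_fst_lt (good a : List (List Int)) (p : Int × Int) (hp : p ∈ pvCs good a) :
    p.1 < 1000 := by
  rw [pvCs_eq_filter] at hp
  simpa using List.of_mem_filter hp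

-- B's any-test on row j is isSome of the block search, for m < 1000
theorem pvQ_eq (good a : List (List Int)) (m : Int) (hm : m < 1000) (j : Nat) :
    ((List.range (a.getD j []).length).any (fun i =>
        (a.getD j []).getD i 0 == m && (good.getD j []).getD i 0 == 0))
      = ((pvF good a j).find? (fun p => p.1 == m)).isSome := by
  rcases h : (pvF good a j).find? (fun p => p.1 == m) with _ | p
  · rw [h]
    rw [List.find?_eq_none] at h
    show _ = false
    rw [List.any_eq_false]
    intro i hi
    simp only [Bool.and_eq_true, beq_iff_eq, not_and]
    intro hv hg
    have hmem : ((a.getD j []).getD i 0, (j : Int)) ∈ pvF good a j := by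
      unfold pvF
      exact List.mem_filterMap.mpr ⟨i, hi, by rw [hv, if_pos ⟨hm, hg⟩]⟩
    exact h _ hmem (by rw [hv]; exact beq_self_eq_true m)
  · rw [h]
    show _ = true
    have hmem := List.mem_of_find?_eq_some h
    have hpred := List.find?_some h
    unfold pvF at hmem
    rcases List.mem_filterMap.mp hmem with ⟨i, hi, hif⟩
    rw [List.any_eq_true]
    refine ⟨i, hi, ?_⟩
    split at hif
    · rename_i hcond
      cases hif
      rw [Bool.and_eq_true]
      exact ⟨hpred, by rw [hcond.2]; decide⟩
    · cases hif

-- ===== VERDICT (by name: the statement is the Claim_ definition above) =====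
theorem yofminbad_spec : Claim_equal_yofminbad := by
  intro good a _ _
  unfold Spec_yofminbad yofminbad_alt
  simp only []
  rw [pvVals_eq_map, pvA_eq_fold,
      pv_fold_filter (pvL good a) ((1000 : Int), (0 : Int)) (by norm_num),
      ← pvCs_eq_filter]
  rcases hcs : pvCs good a with _ | ⟨c, t⟩
  · simp [PySem.List.min?]
  · -- nonempty candidate list: fold from the base lands on the fold from c
    have hc1 : c.1 < 1000 := pvCs_fst_lt good a c (by rw [hcs]; exact List.mem_cons_self)
    have hbase : pvStep ((1000 : Int), (0 : Int)) c = c := by unfold pvStep; simp [hc1]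
    simp only [List.foldl_cons, hbase, List.map_cons]
    set r := t.foldl pvStep c with hr
    -- B's min is r.1
    rw [PySem.List.min?_id_cons]
    have hmin : (t.map Prod.fst).foldl min c.1 = r.1 := (pv_fold_fst t c).symm
    rw [hmin]
    show r.2 = (match (List.range a.length).find? (fun j =>
        (List.range (a.getD j []).length).any (fun i =>
          (a.getD j []).getD i 0 == r.1 && (good.getD j []).getD i 0 == 0)) with
      | some j => (j : Int) | none => 0)
    -- B's search finds r.2
    have hrlt : r.1 < 1000 := by
      have hrm : r ∈ pvCs good a := by rw [hcs]; exact pv_fold_mem t c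
      exact pvCs_fst_lt good a r hrm
    have hfind : (pvCs good a).find? (fun p => p.1 == r.1) = some r := by
      rw [hcs]; exact pv_find_fold t c
    unfold pvCs at hfind
    rw [pv_find_flatMap] at hfind
    rw [pv_findSome_find _ _ _ (fun j _ => pvQ_eq good a r.1 hrlt j)] at hfind
    rcases hq : (List.range a.length).find? (fun j =>
        (List.range (a.getD j []).length).any (fun i =>
          (a.getD j []).getD i 0 == r.1 && (good.getD j []).getD i 0 == 0)) with _ | j0
    · rw [hq] at hfind; cases hfind
    · rw [hq] at hfind
      simp only [Option.bind_some] at hfind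
      have hrj : r.2 = (j0 : Int) :=
        pvF_snd good a j0 r (List.mem_of_find?_eq_some hfind)
      exact hrj
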